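-- pv_equiv track=rewrite | github.com/mariia-rybakova/AlbumDesigner | image_selection/image_clustering/time_clustering.py | assign_images_to_intervals
-- ===== SOURCE A (Python) =====
-- def assign_images_to_intervals(images, intervals):
--     assigned_intervals = []
--     for image in images:
--         for i, interval in enumerate(intervals):
--             if image[1] <= interval[-1][1]:
--                 assigned_intervals.append((image[0],image[1], i))
--                 break
--     return assigned_intervals
-- ===== SOURCE B (Python) =====
-- def assign_images_to_intervals(images, intervals):
--     # prefix maxima of interval last-endpoints: pref[i] = max(ends[0..i]),
--     # nondecreasing, so the first i with ends[i] >= t is the first i with pref[i] >= t,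
--     # found by binary search.
--     pref = []
--     m = None
--     for interval in intervals:
--         e = interval[-1][1]
--         if m is None or e > m:
--             m = e
--         pref.append(m)
--     n = len(pref)
--     out = []
--     for img_id, t in images:
--         lo, hi = 0, n
--         while lo < hi:
--             mid = (lo + hi) // 2
--             if t <= pref[mid]:
--                 hi = mid
--             else:
--                 lo = mid + 1
--         if lo < n:
--             out.append((img_id, t, lo))
--     return out
-- ===== Notes on version B (the rewrite author's own statement) =====
-- stated objective: faster
-- what changed: Replaces the per-image linear scan of intervals with a precomputed nondecreasing prefix-maximum array of interval last-endpoints plus binary search per image.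
-- outside the precondition, e.g. on assign_images_to_intervals([], [[]]): A returns [], B raises IndexError; on assign_images_to_intervals([(1, 5)], [[(0, 10)], []]): A returns [(1, 5, 0)], B raises IndexError
import Mathlib
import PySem

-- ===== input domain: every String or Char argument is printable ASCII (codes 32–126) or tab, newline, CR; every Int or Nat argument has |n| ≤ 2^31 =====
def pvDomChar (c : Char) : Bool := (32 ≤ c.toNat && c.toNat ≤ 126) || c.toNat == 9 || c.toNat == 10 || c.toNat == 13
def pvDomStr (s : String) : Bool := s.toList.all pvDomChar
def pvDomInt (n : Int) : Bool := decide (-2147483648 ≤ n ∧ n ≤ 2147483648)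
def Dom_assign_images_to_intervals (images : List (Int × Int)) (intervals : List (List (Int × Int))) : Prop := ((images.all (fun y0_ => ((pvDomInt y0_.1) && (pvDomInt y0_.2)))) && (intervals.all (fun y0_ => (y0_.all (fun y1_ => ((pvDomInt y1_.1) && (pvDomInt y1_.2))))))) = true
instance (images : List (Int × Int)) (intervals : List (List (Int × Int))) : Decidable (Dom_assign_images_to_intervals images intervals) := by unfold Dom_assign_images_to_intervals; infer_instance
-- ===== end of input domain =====

-- B replaces A's per-image linear scan with a prefix-maximum array of interval
-- last-endpoints plus binary search per image (objective: faster).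

-- ===== PORT A =====
-- interval[-1][1]; Python raises IndexError on an empty interval (excluded by Pre_),
-- the .getD default is never reached inside Pre_.
def pvLastEnd (iv : List (Int × Int)) : Int := ((PySem.List.pyGet? iv (-1)).getD (0, 0)).2

-- the inner 'for i, interval in enumerate(intervals): ... break' loop
def pvAInner (t : Int) (ivs : List (List (Int × Int))) (i : Nat) : Option Nat :=
  match ivs with
  | [] => none
  | iv :: rest => if t ≤ pvLastEnd iv then some i else pvAInner t rest (i + 1)

def assign_images_to_intervals (images : List (Int × Int)) (intervals : List (List (Int × Int))) : List (Int × Int × Int) :=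
  images.foldl (fun acc img =>
    match pvAInner img.2 intervals 0 with
    | some i => acc ++ [(img.1, img.2, (i : Int))]
    | none => acc) []

-- ===== PORT B =====
-- the first loop of Source B: running maximum m (None before the first element)
def pvPref (ivs : List (List (Int × Int))) (m : Option Int) : List Int :=
  match ivs with
  | [] => []
  | iv :: rest =>
    let e := pvLastEnd iv
    let m' := match m with | none => e | some v => if e > v then e else v
    m' :: pvPref rest (some m')

-- the 'while lo < hi' binary search of Source B
def pvBsearch (pref : List Int) (t : Int) (lo hi : Nat) : Nat :=
  if lo < hi then
    if t ≤ pref.getD ((lo + hi) / 2) 0 then pvBsearch pref t lo ((lo + hi) / 2)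
    else pvBsearch pref t ((lo + hi) / 2 + 1) hi
  else lo
termination_by hi - lo
decreasing_by all_goals omega

def assign_images_to_intervals_alt (images : List (Int × Int)) (intervals : List (List (Int × Int))) : List (Int × Int × Int) :=
  let pref := pvPref intervals none
  let n := pref.length
  images.foldl (fun acc img =>
    let lo := pvBsearch pref img.2 0 n
    if lo < n then acc ++ [(img.1, img.2, (lo : Int))] else acc) []

-- ===== PRECONDITION & SPEC =====
-- Pre_ excludes inputs containing an empty interval: there Python A raises IndexError on
-- interval[-1] whenever an image reaches that interval, and B's endpoint precomputation
-- raises IndexError even when A happens to return (its scan stops before the empty interval).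
def Pre_assign_images_to_intervals (images : List (Int × Int)) (intervals : List (List (Int × Int))) : Prop :=
  ∀ iv ∈ intervals, iv ≠ []
instance (images : List (Int × Int)) (intervals : List (List (Int × Int))) : Decidable (Pre_assign_images_to_intervals images intervals) := by unfold Pre_assign_images_to_intervals; infer_instance

def pvWitness_assign_images_to_intervals : (List (Int × Int)) × (List (List (Int × Int))) :=
  ([(1, 2), (3, 9)], [[(0, 3)], [(4, 8)]])

def Spec_assign_images_to_intervals (images : List (Int × Int)) (intervals : List (List (Int × Int))) (out : List (Int × Int × Int)) : Prop := out = assign_images_to_intervals_alt images intervals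
instance (images : List (Int × Int)) (intervals : List (List (Int × Int))) (out : List (Int × Int × Int)) : Decidable (Spec_assign_images_to_intervals images intervals out) := by unfold Spec_assign_images_to_intervals; infer_instance

-- ===== CLAIM (what is proved, stated in full; the proofs are below) =====
def Claim_equal_assign_images_to_intervals : Prop := ∀ (images : List (Int × Int)) (intervals : List (List (Int × Int))), Dom_assign_images_to_intervals images intervals → Pre_assign_images_to_intervals images intervals → Spec_assign_images_to_intervals images intervals (assign_images_to_intervals images intervals)

-- ===== LEMMAS AND PROOFS =====

-- the index both programs compute: first position whose value is ≥ t
def pvHit (t : Int) (l : List Int) : Nat := List.findIdx (fun e => decide (t ≤ e)) l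

theorem pvHit_cons_pos (t a : Int) (l : List Int) (h : t ≤ a) : pvHit t (a :: l) = 0 := by
  simp [pvHit, List.findIdx_cons, h]

theorem pvHit_cons_neg (t a : Int) (l : List Int) (h : ¬ t ≤ a) : pvHit t (a :: l) = pvHit t l + 1 := by
  simp [pvHit, List.findIdx_cons, h]

theorem pvAInner_eq_hit (t : Int) (ivs : List (List (Int × Int))) (i : Nat) :
    pvAInner t ivs i =
      if pvHit t (ivs.map pvLastEnd) < ivs.length then some (i + pvHit t (ivs.map pvLastEnd)) else none := by
  induction ivs generalizing i with
  | nil => simp [pvAInner, pvHit]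
  | cons iv rest ih =>
    by_cases h : t ≤ pvLastEnd iv
    · simp [pvAInner, h, List.map_cons, pvHit_cons_pos t _ _ h]
    · rw [show pvAInner t (iv :: rest) i = pvAInner t rest (i + 1) from by simp [pvAInner, h]]
      rw [List.map_cons, pvHit_cons_neg t _ _ h, ih]
      by_cases h2 : pvHit t (rest.map pvLastEnd) < rest.length
      · rw [if_pos h2, if_pos (by simp; omega)]
        congr 1
        omega
      · rw [if_neg h2, if_neg (by simp; omega)]

theorem pvPref_length (ivs : List (List (Int × Int))) (m : Option Int) :
    (pvPref ivs m).length = ivs.length := by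
  induction ivs generalizing m with
  | nil => rfl
  | cons iv rest ih => simp [pvPref, ih]

theorem pvHit_pref_some (t : Int) (ivs : List (List (Int × Int))) (m : Int) (hm : ¬ t ≤ m) :
    pvHit t (pvPref ivs (some m)) = pvHit t (ivs.map pvLastEnd) := by
  induction ivs generalizing m with
  | nil => rfl
  | cons iv rest ih =>
    rw [show pvPref (iv :: rest) (some m)
        = (if pvLastEnd iv > m then pvLastEnd iv else m)
          :: pvPref rest (some (if pvLastEnd iv > m then pvLastEnd iv else m)) from rfl]
    rw [List.map_cons]
    by_cases h : t ≤ pvLastEnd iv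
    · have h' : t ≤ (if pvLastEnd iv > m then pvLastEnd iv else m) := by split <;> omega
      rw [pvHit_cons_pos t _ _ h', pvHit_cons_pos t _ _ h]
    · have h' : ¬ t ≤ (if pvLastEnd iv > m then pvLastEnd iv else m) := by split <;> omega
      rw [pvHit_cons_neg t _ _ h', pvHit_cons_neg t _ _ h, ih _ h']

theorem pvHit_pref (t : Int) (ivs : List (List (Int × Int))) :
    pvHit t (pvPref ivs none) = pvHit t (ivs.map pvLastEnd) := by
  cases ivs with
  | nil => rfl
  | cons iv rest =>
    rw [show pvPref (iv :: rest) none = pvLastEnd iv :: pvPref rest (some (pvLastEnd iv)) from rfl]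
    rw [List.map_cons]
    by_cases h : t ≤ pvLastEnd iv
    · rw [pvHit_cons_pos t _ _ h, pvHit_cons_pos t _ _ h]
    · rw [pvHit_cons_neg t _ _ h, pvHit_cons_neg t _ _ h, pvHit_pref_some t rest _ h]

theorem pvPref_sorted_some (ivs : List (List (Int × Int))) (m : Int) :
    (∀ x ∈ pvPref ivs (some m), m ≤ x) ∧ List.Pairwise (· ≤ ·) (pvPref ivs (some m)) := by
  induction ivs generalizing m with
  | nil => simp [pvPref]
  | cons iv rest ih =>
    have hm' : m ≤ (if pvLastEnd iv > m then pvLastEnd iv else m) := by split <;> omega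
    obtain ⟨hall, hpw⟩ := ih (if pvLastEnd iv > m then pvLastEnd iv else m)
    refine ⟨?_, ?_⟩
    · intro x hx
      simp only [pvPref, List.mem_cons] at hx
      rcases hx with rfl | hx
      · exact hm'
      · exact le_trans hm' (hall x hx)
    · simp only [pvPref, List.pairwise_cons]
      exact ⟨hall, hpw⟩

theorem pvPref_sorted (ivs : List (List (Int × Int))) :
    List.Pairwise (· ≤ ·) (pvPref ivs none) := by
  cases ivs with
  | nil => simp [pvPref]
  | cons iv rest =>
    simp only [pvPref, List.pairwise_cons]
    exact ⟨(pvPref_sorted_some rest (pvLastEnd iv)).1, (pvPref_sorted_some rest (pvLastEnd iv)).2⟩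

theorem pvBsearch_eq_hit (pref : List Int) (t : Int) (hs : List.Pairwise (· ≤ ·) pref)
    (lo hi : Nat) (hlo : lo ≤ pvHit t pref) (hhi : pvHit t pref ≤ hi) (hn : hi ≤ pref.length) :
    pvBsearch pref t lo hi = pvHit t pref := by
  rw [pvBsearch]
  by_cases hlt : lo < hi
  · rw [if_pos hlt]
    have hmidn : (lo + hi) / 2 < pref.length := by omega
    have hget : pref.getD ((lo + hi) / 2) 0 = pref[(lo + hi) / 2] := List.getD_eq_getElem _ _ hmidn
    by_cases hc : t ≤ pref.getD ((lo + hi) / 2) 0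
    · rw [if_pos hc]
      -- t ≤ pref[mid] ⇒ hit ≤ mid
      have hk : pvHit t pref ≤ (lo + hi) / 2 := by
        by_contra hk
        have := List.not_of_lt_findIdx (p := fun e => decide (t ≤ e)) (xs := pref)
          (i := (lo + hi) / 2) (by unfold pvHit at hk; omega)
        rw [hget] at hc
        simp at this
        omega
      exact pvBsearch_eq_hit pref t hs lo ((lo + hi) / 2) hlo hk (by omega)
    · rw [if_neg hc]
      -- ¬ t ≤ pref[mid] ⇒ mid < hit
      have hk : (lo + hi) / 2 + 1 ≤ pvHit t pref := by
        by_contra hk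
        have hkn : pvHit t pref < pref.length := by omega
        have hhit : t ≤ pref[pvHit t pref] := by
          have := List.findIdx_getElem (p := fun e => decide (t ≤ e)) (xs := pref)
            (w := by unfold pvHit at hkn; exact hkn)
          simpa [pvHit] using this
        have hmono : pref[pvHit t pref] ≤ pref[(lo + hi) / 2] := by
          rcases Nat.lt_or_ge (pvHit t pref) ((lo + hi) / 2) with h | h
          · exact (List.pairwise_iff_getElem.mp hs) _ _ hkn hmidn h
          · have heq : pvHit t pref = (lo + hi) / 2 := by omega
            simp [heq]
        rw [hget] at hc
        omega
      exact pvBsearch_eq_hit pref t hs ((lo + hi) / 2 + 1) hi hk hhi hn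
  · rw [if_neg hlt]
    omega
termination_by hi - lo
decreasing_by all_goals omega

theorem step_eq (intervals : List (List (Int × Int))) (t : Int) :
    pvAInner t intervals 0 =
      (if pvBsearch (pvPref intervals none) t 0 (pvPref intervals none).length < (pvPref intervals none).length
       then some (pvBsearch (pvPref intervals none) t 0 (pvPref intervals none).length) else none) := by
  have hb : pvBsearch (pvPref intervals none) t 0 (pvPref intervals none).length
      = pvHit t (pvPref intervals none) := by
    apply pvBsearch_eq_hit _ _ (pvPref_sorted intervals) _ _ (Nat.zero_le _)
      (by unfold pvHit; exact List.findIdx_le_length) (le_refl _)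
  rw [pvAInner_eq_hit, hb, pvHit_pref, pvPref_length]
  simp

theorem fold_eq (images : List (Int × Int)) (intervals : List (List (Int × Int))) :
    assign_images_to_intervals images intervals = assign_images_to_intervals_alt images intervals := by
  unfold assign_images_to_intervals assign_images_to_intervals_alt
  induction images using List.reverseRecOn with
  | nil => rfl
  | append_singleton imgs img ih =>
    simp only [List.foldl_append, List.foldl_cons, List.foldl_nil] at *
    rw [ih, step_eq intervals img.2]
    by_cases hc : pvBsearch (pvPref intervals none) img.2 0 (pvPref intervals none).length
        < (pvPref intervals none).length
    · simp [hc]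
    · simp [hc]

-- ===== VERDICT (by name: the statement is the Claim_ definition above) =====
theorem assign_images_to_intervals_spec : Claim_equal_assign_images_to_intervals := by
  intro images intervals _ _
  exact fold_eq images intervals
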